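-- pv_equiv track=rewrite | github.com/patelyash96/Assignments | TeamLab_coding_test/yash_patel_teamlab_coding_test.py | operation_s
-- ===== SOURCE A (Python) =====
-- def operation_s(numbers):
--     result = []
--     biggest = None
--
--     for num in numbers:
--         if biggest is None or num >= biggest:
--             biggest = num
--             result.append(num)
--
--     return result
-- ===== SOURCE B (Python) =====
-- def operation_s(numbers):
--     nums = list(numbers)
--     return [n for i, n in enumerate(nums) if i == 0 or n >= max(nums[:i])]
-- ===== Notes on version B (the rewrite author's own statement) =====
-- stated objective: alternative
-- what changed: Replaces the stateful running-max loop by a stateless comprehension that keeps element i iff it is first or >= max of the slice before it (trades O(n) state-threading for O(n^2) slice maxima).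
import Mathlib
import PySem

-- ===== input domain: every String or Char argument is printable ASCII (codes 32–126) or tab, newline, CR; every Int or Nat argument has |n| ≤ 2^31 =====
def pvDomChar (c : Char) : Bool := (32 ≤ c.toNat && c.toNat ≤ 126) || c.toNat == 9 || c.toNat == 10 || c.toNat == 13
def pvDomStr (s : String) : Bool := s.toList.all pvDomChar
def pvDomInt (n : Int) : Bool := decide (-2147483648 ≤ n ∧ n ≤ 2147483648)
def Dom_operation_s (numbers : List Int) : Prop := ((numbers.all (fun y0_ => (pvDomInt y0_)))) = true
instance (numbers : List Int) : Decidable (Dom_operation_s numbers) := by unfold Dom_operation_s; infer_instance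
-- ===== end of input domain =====

-- B replaces A's stateful running-max loop by a stateless comprehension keeping
-- element i iff i == 0 or it is >= max of the slice before it (alternative decomposition).


-- ===== PORT A =====
-- literal port of A: fold over numbers carrying (result, biggest : Option Int)
def operation_s (numbers : List Int) : List Int :=
  (numbers.foldl
    (fun (st : List Int × Option Int) num =>
      match st.2 with
      | none => (st.1 ++ [num], some num)
      | some b => if num ≥ b then (st.1 ++ [num], some num) else st)
    ([], none)).1

-- ===== PORT B =====
-- the comprehension's test: i == 0 or n >= max(nums[:i])   (max of a nonempty slice)
def pvKeep (nums : List Int) (p : Int × Int) : Bool :=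
  p.1 == 0 ||
    (match PySem.List.max? (PySem.List.slice nums (some 0) (some p.1)) (fun y => y) with
     | some m => decide (p.2 ≥ m)
     | none => false)

-- literal port of B: left-to-right comprehension over enumerate(nums)
def operation_s_alt (numbers : List Int) : List Int :=
  (PySem.List.enumerate numbers 0).foldl
    (fun acc p => if pvKeep numbers p then acc ++ [p.2] else acc) []

-- ===== PRECONDITION & SPEC =====
def Spec_operation_s (numbers : List Int) (out : List Int) : Prop := out = operation_s_alt numbers
instance (numbers : List Int) (out : List Int) : Decidable (Spec_operation_s numbers out) := by unfold Spec_operation_s; infer_instance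

-- ===== CLAIM (what is proved, stated in full; the proofs are below) =====
def Claim_equal_operation_s : Prop := ∀ (numbers : List Int), Dom_operation_s numbers → Spec_operation_s numbers (operation_s numbers)

-- ===== LEMMAS AND PROOFS =====

-- the common recursive skeleton: running maxima of t, seeded with biggest = b
def pvGo : List Int → Int → List Int
  | [], _ => []
  | x :: xs, b => if x ≥ b then x :: pvGo xs x else pvGo xs b

theorem pvA_foldl (t : List Int) (res : List Int) (b : Int) :
    (t.foldl
      (fun (st : List Int × Option Int) num =>
        match st.2 with
        | none => (st.1 ++ [num], some num)
        | some b => if num ≥ b then (st.1 ++ [num], some num) else st)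
      (res, some b)).1 = res ++ pvGo t b := by
  induction t generalizing res b with
  | nil => simp [pvGo]
  | cons x xs ih =>
    by_cases h : x ≥ b
    · simp [List.foldl_cons, h, pvGo, ih]
    · simp [List.foldl_cons, h, pvGo, ih]

theorem pvA_eq (x : Int) (xs : List Int) : operation_s (x :: xs) = x :: pvGo xs x := by
  simp [operation_s, List.foldl_cons, pvA_foldl]

theorem pvKeep_eval (full pre t : List Int) (y : Int) (h0 : Int) (t0 : List Int)
    (hpre : pre = h0 :: t0) (hfull : full = pre ++ t) :
    pvKeep full ((pre.length : Int), y) = decide (y ≥ t0.foldl max h0) := by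
  subst hpre hfull
  have hsl : PySem.List.slice ((h0 :: t0) ++ t) (some 0) (some ((h0 :: t0).length : Int))
      = h0 :: t0 := by
    rw [PySem.List.slice_zero_start, PySem.List.slice_to_natCast]
    simp
  unfold pvKeep
  rw [hsl, PySem.List.max?_id_cons]
  have hz : ((((h0 :: t0).length : Nat) : Int) == 0) = false := by
    simp
    omega
  rw [hz]
  simp

theorem pvB_core (t : List Int) (full : List Int) (h0 : Int) (t0 : List Int)
    (hfull : full = (h0 :: t0) ++ t) :
    ((PySem.List.enumerate t (((h0 :: t0).length : Nat) : Int)).foldl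
      (fun acc p => if pvKeep full p then acc ++ [p.2] else acc) []) =
    pvGo t (t0.foldl max h0) := by
  induction t generalizing t0 with
  | nil => simp [PySem.List.enumerate, pvGo]
  | cons y ys ih =>
    rw [PySem.List.enumerate_cons, List.foldl_cons]
    rw [pvKeep_eval full (h0 :: t0) (y :: ys) y h0 t0 rfl hfull]
    by_cases h : y ≥ t0.foldl max h0
    · have hmax : (t0 ++ [y]).foldl max h0 = y := by
        rw [List.foldl_append]; simp; omega
      have hlen : ((((h0 :: t0).length : Nat) : Int) + 1)
          = (((h0 :: (t0 ++ [y])).length : Nat) : Int) := by simp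
      have := ih (t0 ++ [y]) (by simpa using hfull)
      rw [hmax] at this
      simp only [h, decide_true, if_true, pvGo]
      rw [hlen]
      rw [PySem.List.foldl_append_if] at this ⊢
      simpa using this
    · have hmax : (t0 ++ [y]).foldl max h0 = t0.foldl max h0 := by
        rw [List.foldl_append]; simp; omega
      have hlen : ((((h0 :: t0).length : Nat) : Int) + 1)
          = (((h0 :: (t0 ++ [y])).length : Nat) : Int) := by simp
      have := ih (t0 ++ [y]) (by simpa using hfull)
      rw [hmax] at this
      simp only [h, decide_false, if_false, pvGo]
      rw [hlen]
      exact this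

theorem pvB_eq (x : Int) (xs : List Int) : operation_s_alt (x :: xs) = x :: pvGo xs x := by
  unfold operation_s_alt
  rw [PySem.List.enumerate_cons, List.foldl_cons]
  have hk : pvKeep (x :: xs) (0, x) = true := by simp [pvKeep]
  rw [hk]
  simp only [if_true]
  have := pvB_core xs (x :: xs) x [] rfl
  simp only [List.length_cons, List.length_nil, List.foldl_nil] at this
  rw [PySem.List.foldl_append_if] at this ⊢
  norm_num at this ⊢
  rw [this]

-- ===== VERDICT (by name: the statement is the Claim_ definition above) =====
theorem operation_s_spec : Claim_equal_operation_s := by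
  intro numbers _
  unfold Spec_operation_s
  cases numbers with
  | nil => rfl
  | cons x xs => rw [pvA_eq, pvB_eq]
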